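-- pv_equiv track=rewrite | github.com/adotdong29/CoordPy | vision_mvp/experiments/phase86_multi_host_disjoint_quorum.py | _interleave_by_family
-- ===== SOURCE A (Python) =====
-- def _interleave_by_family(scenarios: list, n_families: int = 4) -> list:
--     n = len(scenarios)
--     if n_families <= 1 or n % n_families != 0:
--         return list(scenarios)
--     n_replicates = n // n_families
--     out = []
--     for r in range(n_replicates):
--         for f in range(n_families):
--             idx = f * n_replicates + r
--             if idx < n:
--                 out.append(scenarios[idx])
--     return out
-- ===== SOURCE B (Python) =====
-- def _interleave_by_family(scenarios: list, n_families: int = 4) -> list: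
--     n = len(scenarios)
--     if n_families <= 1 or n % n_families != 0:
--         return list(scenarios)
--     k = n // n_families
--     families = [scenarios[f * k:(f + 1) * k] for f in range(n_families)]
--     return [s for group in zip(*families) for s in group]
-- ===== Notes on version B (the rewrite author's own statement) =====
-- stated objective: simpler
-- what changed: Replaces the double index-arithmetic loop (f*n_replicates+r with a redundant idx<n guard) by slicing the list into contiguous family chunks and transposing them with zip, reading the interleaving column-wise.
import Mathlib
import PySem

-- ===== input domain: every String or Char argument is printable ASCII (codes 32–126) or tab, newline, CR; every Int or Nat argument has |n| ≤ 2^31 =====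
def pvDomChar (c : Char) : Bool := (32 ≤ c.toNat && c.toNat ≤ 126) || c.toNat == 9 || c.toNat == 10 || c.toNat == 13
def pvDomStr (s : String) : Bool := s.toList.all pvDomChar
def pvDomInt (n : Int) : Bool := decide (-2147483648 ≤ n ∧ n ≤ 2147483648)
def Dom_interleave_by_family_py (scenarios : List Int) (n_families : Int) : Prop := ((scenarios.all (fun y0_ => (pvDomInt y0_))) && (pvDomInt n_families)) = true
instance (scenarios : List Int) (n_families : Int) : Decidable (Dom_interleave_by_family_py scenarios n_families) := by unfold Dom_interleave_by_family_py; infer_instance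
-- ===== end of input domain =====

-- B replaces A's double index-arithmetic loop by slicing into contiguous family chunks and
-- transposing them (zip), a simpler column-wise reading of the same interleaving.


-- ===== PORT A =====
-- literal transliteration of A: guard, then the r/f double loop appending scenarios[idx]
-- (idx is always in range when the append fires, so pyGetD's default is never used)
def interleave_by_family_py (scenarios : List Int) (n_families : Int) : List Int :=
  let n : Int := scenarios.length
  if n_families ≤ 1 ∨ PySem.Int.mod n n_families ≠ 0 then
    scenarios
  else
    let n_replicates := PySem.Int.floordiv n n_families
    (PySem.List.pyRange 0 n_replicates 1).foldl (fun out r =>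
      (PySem.List.pyRange 0 n_families 1).foldl (fun out f =>
        if f * n_replicates + r < n then
          out ++ [PySem.List.pyGetD scenarios (f * n_replicates + r) 0]
        else out) out) []

-- ===== PORT B =====
-- hand port of Python's variadic zip(*fams): emit the heads, recurse on the tails,
-- stop at the first exhausted family (exact for zip of one or more lists)
def pvZipStar (fams : List (List Int)) : List (List Int) :=
  if h : fams ≠ [] ∧ fams.all (fun l => !l.isEmpty) then
    (fams.map (fun l => l.headD 0)) :: pvZipStar (fams.map List.tail)
  else
    []
termination_by (fams.headD []).length
decreasing_by
  obtain ⟨hne, hall⟩ := h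
  cases fams with
  | nil => exact absurd rfl hne
  | cons a t =>
    simp only [List.all_cons, Bool.and_eq_true, Bool.not_eq_true', List.isEmpty_eq_false_iff]
      at hall
    cases a with
    | nil => exact absurd rfl hall.1
    | cons x xs => simp

def interleave_by_family_py_alt (scenarios : List Int) (n_families : Int) : List Int :=
  let n : Int := scenarios.length
  if n_families ≤ 1 ∨ PySem.Int.mod n n_families ≠ 0 then
    scenarios
  else
    let k := PySem.Int.floordiv n n_families
    let families := (PySem.List.pyRange 0 n_families 1).map fun f =>
      PySem.List.slice scenarios (some (f * k)) (some ((f + 1) * k))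
    (pvZipStar families).flatten

-- ===== PRECONDITION & SPEC =====
def Spec_interleave_by_family_py (scenarios : List Int) (n_families : Int) (out : List Int) : Prop := out = interleave_by_family_py_alt scenarios n_families
instance (scenarios : List Int) (n_families : Int) (out : List Int) : Decidable (Spec_interleave_by_family_py scenarios n_families out) := by unfold Spec_interleave_by_family_py; infer_instance

-- ===== CLAIM (what is proved, stated in full; the proofs are below) =====
def Claim_equal_interleave_by_family_py : Prop := ∀ (scenarios : List Int) (n_families : Int), Dom_interleave_by_family_py scenarios n_families → Spec_interleave_by_family_py scenarios n_families (interleave_by_family_py scenarios n_families)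

-- ===== LEMMAS AND PROOFS =====

-- the common reference value: for r = 0..K-1, for f = 0..F-1, take element f*K+r
def pvSpecIL (xs : List Int) (F K : Nat) : List Int :=
  (List.range K).flatMap fun r => (List.range F).map fun f => xs.getD (f * K + r) 0

theorem pvZipStar_char (K : Nat) : ∀ (fams : List (List Int)), fams ≠ [] →
    (∀ l ∈ fams, l.length = K) →
    pvZipStar fams = (List.range K).map (fun r => fams.map (fun l => l.getD r 0)) := by
  induction K with
  | zero =>
    intro fams hne hlen
    rw [pvZipStar]
    have hfalse : ¬ (fams ≠ [] ∧ fams.all (fun l => !l.isEmpty) = true) := by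
      rintro ⟨-, hall⟩
      match fams, hne with
      | a :: t, _ =>
        have ha : a = [] := List.eq_nil_of_length_eq_zero (hlen a (by simp))
        rw [List.all_cons] at hall
        simp [ha] at hall
    rw [dif_neg hfalse]
    simp
  | succ K ih =>
    intro fams hne hlen
    rw [pvZipStar]
    have hcond : fams ≠ [] ∧ fams.all (fun l => !l.isEmpty) = true := by
      refine ⟨hne, ?_⟩
      simp only [List.all_eq_true, Bool.not_eq_true', List.isEmpty_eq_false_iff]
      intro l hl
      have := hlen l hl; intro h; simp [h] at this
    rw [dif_pos hcond]
    have htail : ∀ l ∈ fams.map List.tail, l.length = K := by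
      intro l hl
      obtain ⟨l', hl', rfl⟩ := List.mem_map.mp hl
      have := hlen l' hl'
      simp [List.length_tail, this]
    have hne' : fams.map List.tail ≠ [] := by simpa using hne
    rw [ih _ hne' htail, List.range_succ_eq_map]
    simp only [List.map_cons, List.map_map]
    congr 1
    · apply List.map_congr_left
      intro l hl
      have hl0 : l ≠ [] := by
        have := hlen l hl; intro h; simp [h] at this
      match l, hl0 with
      | a :: t, _ => simp
    · apply List.map_congr_left
      intro r _
      simp only [Function.comp]
      apply List.map_congr_left
      intro l _
      match l with
      | [] => simp
      | a :: t => simp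

-- characterization of A's double loop
theorem pvA_char (xs : List Int) (F K : Nat) (hF : 2 ≤ F) (hlen : xs.length = F * K) :
    (PySem.List.pyRange 0 (K : Int) 1).foldl (fun out r =>
      (PySem.List.pyRange 0 (F : Int) 1).foldl (fun out f =>
        if f * (K : Int) + r < (xs.length : Int) then
          out ++ [PySem.List.pyGetD xs (f * (K : Int) + r) 0] else out) out) []
      = pvSpecIL xs F K := by
  rw [PySem.List.foldl_congr_mem (PySem.List.pyRange 0 (K : Int) 1) _
      (fun out r => out ++ ((PySem.List.pyRange 0 (F : Int) 1).map
        fun f => PySem.List.pyGetD xs (f * (K : Int) + r) 0)) [] ?_]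
  · rw [PySem.List.foldl_append_eq_flatMap]
    simp only [List.nil_append, pvSpecIL]
    rw [PySem.List.pyRange_zero_natCast K, PySem.List.pyRange_zero_natCast F, List.flatMap_map]
    apply List.flatMap_congr
    intro r _
    rw [List.map_map]
    apply List.map_congr_left
    intro f _
    simp only [Function.comp]
    have hcast : (f : Int) * (K : Int) + (r : Int) = ((f * K + r : Nat) : Int) := by
      push_cast; ring
    rw [hcast, PySem.List.pyGetD_natCast]
  · intro acc r hr
    have hrb := PySem.List.mem_pyRange_one.mp hr
    rw [PySem.List.foldl_congr_mem (PySem.List.pyRange 0 (F : Int) 1) _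
        (fun acc2 f => acc2 ++ [PySem.List.pyGetD xs (f * (K : Int) + r) 0]) acc ?_]
    · exact PySem.List.foldl_append_singleton_eq_map _ _ _
    · intro acc2 f hf
      have hfb := PySem.List.mem_pyRange_one.mp hf
      have hidx : f * (K : Int) + r < (xs.length : Int) := by
        have h1 : f * (K : Int) ≤ ((F : Int) - 1) * (K : Int) := by
          apply mul_le_mul_of_nonneg_right (by omega) (by positivity)
        have h2 : ((F : Int) - 1) * (K : Int) + (K : Int) = ((F * K : Nat) : Int) := by
          push_cast; ring
        rw [hlen]
        omega
      simp only [if_pos hidx]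

-- each slice chunk f is (drop (f*K)).take K
theorem pvChunk_eq (xs : List Int) (K : Nat) (f : Nat) :
    PySem.List.slice xs (some ((f : Int) * (K : Int))) (some (((f : Int) + 1) * (K : Int)))
      = (xs.drop (f * K)).take K := by
  have h1 : (f : Int) * (K : Int) = ((f * K : Nat) : Int) := by push_cast; ring
  have h2 : ((f : Int) + 1) * (K : Int) = ((f * K + K : Nat) : Int) := by push_cast; ring
  rw [h1, h2, PySem.List.slice_natCast]
  congr 1
  omega

-- characterization of B's chunk-and-transpose
theorem pvB_char (xs : List Int) (F K : Nat) (hF : 2 ≤ F) (hlen : xs.length = F * K) :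
    (pvZipStar ((PySem.List.pyRange 0 (F : Int) 1).map fun f =>
        PySem.List.slice xs (some (f * (K : Int))) (some ((f + 1) * (K : Int))))).flatten
      = pvSpecIL xs F K := by
  set fams := (PySem.List.pyRange 0 (F : Int) 1).map fun f =>
      PySem.List.slice xs (some (f * (K : Int))) (some ((f + 1) * (K : Int))) with hfams
  have hne : fams ≠ [] := by
    simp [hfams, PySem.List.pyRange_zero_natCast]
    omega
  have hlens : ∀ l ∈ fams, l.length = K := by
    intro l hl
    rw [hfams] at hl
    obtain ⟨fI, hfI, rfl⟩ := List.mem_map.mp hl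
    rw [PySem.List.pyRange_zero_natCast] at hfI
    obtain ⟨f, hfF, rfl⟩ := List.mem_map.mp hfI
    rw [List.mem_range] at hfF
    rw [pvChunk_eq xs K f]
    simp only [List.length_take, List.length_drop, hlen]
    have h1 := Nat.mul_le_mul_right K (Nat.succ_le_of_lt hfF)
    have h2 := Nat.succ_mul f K
    omega
  rw [pvZipStar_char K fams hne hlens]
  rw [pvSpecIL, ← List.flatMap_def]
  apply List.flatMap_congr
  intro r hr
  rw [List.mem_range] at hr
  rw [hfams, PySem.List.pyRange_zero_natCast, List.map_map, List.map_map]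
  apply List.map_congr_left
  intro f hf
  rw [List.mem_range] at hf
  simp only [Function.comp]
  rw [pvChunk_eq xs K f]
  have hidx : f * K + r < xs.length := by
    rw [hlen]
    have h1 := Nat.mul_le_mul_right K (Nat.succ_le_of_lt hf)
    have h2 := Nat.succ_mul f K
    omega
  rw [List.getD_eq_getElem?_getD, List.getD_eq_getElem?_getD,
    List.getElem?_take, if_pos hr, List.getElem?_drop]

-- ===== VERDICT (by name: the statement is the Claim_ definition above) =====
theorem interleave_by_family_py_spec : Claim_equal_interleave_by_family_py := by
  intro scenarios n_families _
  unfold Spec_interleave_by_family_py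
  simp only [interleave_by_family_py, interleave_by_family_py_alt]
  by_cases hg : n_families ≤ 1 ∨ PySem.Int.mod (scenarios.length : Int) n_families ≠ 0
  · rw [if_pos hg, if_pos hg]
  · rw [if_neg hg, if_neg hg]
    push_neg at hg
    obtain ⟨h1, h2⟩ := hg
    have hpos : (0 : Int) < n_families := by omega
    set F : Nat := n_families.toNat with hFdef
    have hFcast : (F : Int) = n_families := Int.toNat_of_nonneg (by omega)
    have hF2 : 2 ≤ F := by omega
    have hdvd : (n_families : Int) ∣ (scenarios.length : Int) := by
      rw [PySem.Int.mod_eq_emod_of_pos hpos] at h2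
      exact Int.dvd_of_emod_eq_zero h2
    have hdvdNat : F ∣ scenarios.length := by
      have : (F : Int) ∣ (scenarios.length : Int) := hFcast ▸ hdvd
      exact_mod_cast this
    set K : Nat := scenarios.length / F with hKdef
    have hlen : scenarios.length = F * K := (Nat.mul_div_cancel' hdvdNat).symm
    have hflo : PySem.Int.floordiv (scenarios.length : Int) n_families = (K : Int) := by
      rw [← hFcast, PySem.Int.floordiv_natCast]
    rw [hflo, ← hFcast]
    rw [pvA_char scenarios F K hF2 hlen, pvB_char scenarios F K hF2 hlen]
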